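-- pv_equiv track=rewrite | github.com/Dudly01/pkmn | core/scripts/create_evo_chains.py | create_evo_chains
-- ===== SOURCE A (Python) =====
-- from collections import deque
--
-- def create_evo_chains(evolutions: dict[str, dict[str, str]]) -> list[str]:
--     """Returns the list of complete evolution chains."""
--     complete_paths: list[str] = []
--     pokemons_to_visit = deque(((name, name) for name in evolutions.keys()))
--     pokemon_visited: set[str] = set()
--     while pokemons_to_visit:
--         curr_pokemon, evo_path = pokemons_to_visit.popleft()
--
--         if curr_pokemon in pokemon_visited:
--             # Already visited this pokemon
--             continue
--         pokemon_visited.add(curr_pokemon)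
--
--         if len(evolutions[curr_pokemon]) == 0:
--             # No more evolutions, path is complete
--             complete_paths.append(evo_path)
--             continue
--
--         for evo_name, evo_trigger in reversed(evolutions[curr_pokemon].items()):
--             # Reverse iter to compensate FILO deque
--             curr_evo_path = f"{evo_path}->{evo_trigger}->{evo_name}"
--             pokemons_to_visit.appendleft((evo_name, curr_evo_path))
--
--     return complete_paths
-- ===== SOURCE B (Python) =====
-- def create_evo_chains(evolutions: dict[str, dict[str, str]]) -> list[str]:
--     """Returns the list of complete evolution chains."""
--     complete_paths: list[str] = []
--     visited: set[str] = set()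
--
--     def visit(name: str, path: str) -> None:
--         if name in visited:
--             return
--         visited.add(name)
--         evos = evolutions[name]
--         if not evos:
--             complete_paths.append(path)
--             return
--         for evo_name, evo_trigger in evos.items():
--             visit(evo_name, f"{path}->{evo_trigger}->{evo_name}")
--
--     for name in evolutions:
--         visit(name, name)
--     return complete_paths
-- ===== Notes on version B (the rewrite author's own statement) =====
-- stated objective: idiomatic
-- what changed: Replaces the explicit deque-as-stack loop (with reversed child iteration compensating the appendleft/popleft discipline) by a recursive DFS helper visit(name, path) that shares one visited set and one output list and iterates children in plain dict order.
import Mathlib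
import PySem

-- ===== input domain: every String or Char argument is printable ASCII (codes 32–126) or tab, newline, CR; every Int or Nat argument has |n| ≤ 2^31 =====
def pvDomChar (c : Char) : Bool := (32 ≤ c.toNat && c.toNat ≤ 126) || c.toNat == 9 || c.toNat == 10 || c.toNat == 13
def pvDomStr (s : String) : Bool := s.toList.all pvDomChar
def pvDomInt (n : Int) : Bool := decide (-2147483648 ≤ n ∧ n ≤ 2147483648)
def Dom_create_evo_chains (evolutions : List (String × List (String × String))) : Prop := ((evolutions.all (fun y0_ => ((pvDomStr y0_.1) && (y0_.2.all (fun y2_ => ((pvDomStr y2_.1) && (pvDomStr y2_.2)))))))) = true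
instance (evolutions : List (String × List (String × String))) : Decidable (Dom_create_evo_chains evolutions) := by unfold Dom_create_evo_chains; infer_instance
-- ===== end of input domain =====

-- B replaces A's explicit deque-as-stack traversal (reversed-children + appendleft) by a recursive
-- DFS helper shared-visited traversal — same values, plainer control flow (objective: idiomatic).


-- Measure helpers used by the termination argument of the ports (they do not affect the values computed).
-- pvAllNames: every name occurring anywhere (keys and evolution targets), deduplicated.
def pvAllNames (evolutions : List (String × List (String × String))) : List String :=
  (evolutions.map Prod.fst ++ evolutions.flatMap (fun p => p.2.map Prod.fst)).dedup

-- pvT: total number of (target, trigger) pairs.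
def pvT (evolutions : List (String × List (String × String))) : Nat :=
  (evolutions.map (fun p => p.2.length)).sum

-- pvUnseen: how many known names are not yet in the visited set.
def pvUnseen (evolutions : List (String × List (String × String)))
    (v : PySem.Set String) : Nat :=
  ((pvAllNames evolutions).filter (fun s => !PySem.Set.contains v s)).length

-- The reversed-iteration + appendleft loop of A prepends the children in original order.
theorem pvFoldlConsEq (g : String × String → String × String) :
    ∀ (ys rest : List (String × String)),
      ys.foldl (fun q y => g y :: q) rest = ys.reverse.map g ++ rest := by
  intro ys
  induction ys with
  | nil => intro rest; rfl
  | cons y ys ih =>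
    intro rest
    simp only [List.foldl_cons, ih, List.reverse_cons, List.map_append, List.map_cons,
      List.map_nil, List.append_assoc, List.cons_append, List.nil_append]

-- A successful dict lookup names a key (hence a known name) and a child list bounded by pvT.
theorem pvGetSomeFacts (evolutions : List (String × List (String × String)))
    (n : String) (cs : List (String × String))
    (h : PySem.Dict.get? (PySem.Dict.mk evolutions) n = some cs) :
    n ∈ pvAllNames evolutions ∧ cs.length ≤ pvT evolutions := by
  simp only [PySem.Dict.get?, Option.map_eq_some_iff] at h
  obtain ⟨p, hp, hps⟩ := h
  have hmem : p ∈ evolutions := List.mem_of_find?_eq_some hp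
  have hpn : p.1 = n := by
    have hbeq := List.find?_some hp
    simpa using hbeq
  constructor
  · have : n ∈ evolutions.map Prod.fst := by
      exact hpn ▸ List.mem_map_of_mem hmem
    simp only [pvAllNames, List.mem_dedup, List.mem_append]
    exact Or.inl this
  · have : cs.length ∈ evolutions.map (fun p => p.2.length) := by
      have := List.mem_map_of_mem (f := fun p => p.2.length) hmem
      simpa [hps] using this
    exact List.le_sum_of_mem this

theorem pvContainsAdd (v : PySem.Set String) (x s : String) :
    PySem.Set.contains (PySem.Set.add v x) s = (PySem.Set.contains v s || s == x) := by
  rw [Bool.eq_iff_iff]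
  simp only [Bool.or_eq_true, beq_iff_eq, PySem.Set.contains_iff, PySem.Set.mem_add]

theorem pvUnseenMono (evolutions : List (String × List (String × String)))
    (v w : PySem.Set String)
    (h : ∀ x, PySem.Set.contains v x = true → PySem.Set.contains w x = true) :
    pvUnseen evolutions w ≤ pvUnseen evolutions v := by
  unfold pvUnseen
  apply List.Sublist.length_le
  apply List.monotone_filter_right
  intro a ha
  simp only [Bool.not_eq_eq_eq_not, Bool.not_true] at ha ⊢
  cases hv : PySem.Set.contains v a with
  | false => rfl
  | true => rw [h a hv] at ha; exact ha

theorem pvUnseenAddLe (evolutions : List (String × List (String × String)))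
    (v : PySem.Set String) (x : String) :
    pvUnseen evolutions (PySem.Set.add v x) ≤ pvUnseen evolutions v := by
  apply pvUnseenMono
  intro s hs
  rw [pvContainsAdd, hs, Bool.true_or]

theorem pvFilterAddLen (v : PySem.Set String) (x : String)
    (hv : PySem.Set.contains v x = false) :
    ∀ (l : List String), l.Nodup → x ∈ l →
      (l.filter (fun s => !PySem.Set.contains (PySem.Set.add v x) s)).length + 1
        = (l.filter (fun s => !PySem.Set.contains v s)).length := by
  intro l
  induction l with
  | nil => intro _ hx; simp at hx
  | cons a l ih =>
    intro hnd hx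
    rcases List.nodup_cons.mp hnd with ⟨hal, hl⟩
    by_cases hax : a = x
    · subst hax
      have hfe : l.filter (fun s => !PySem.Set.contains (PySem.Set.add v a) s)
          = l.filter (fun s => !PySem.Set.contains v s) := by
        apply List.filter_congr
        intro s hs
        have hsa : s ≠ a := fun he => hal (he ▸ hs)
        rw [pvContainsAdd]
        simp [hsa]
      have h1 : PySem.Set.contains (PySem.Set.add v a) a = true := by
        rw [pvContainsAdd]; simp
      rw [List.filter_cons, List.filter_cons, h1, hv, hfe]
      simp
    · have hxl : x ∈ l := by
        rcases List.mem_cons.mp hx with h | h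
        · exact absurd h.symm hax
        · exact h
      have hca : PySem.Set.contains (PySem.Set.add v x) a = PySem.Set.contains v a := by
        rw [pvContainsAdd]
        simp [hax]
      rw [List.filter_cons, List.filter_cons, hca]
      cases hcv : PySem.Set.contains v a with
      | false => simpa using ih hl hxl
      | true => simpa using ih hl hxl

theorem pvUnseenAddSucc (evolutions : List (String × List (String × String)))
    (v : PySem.Set String) (x : String)
    (hx : x ∈ pvAllNames evolutions) (hv : PySem.Set.contains v x = false) :
    pvUnseen evolutions (PySem.Set.add v x) + 1 = pvUnseen evolutions v := by
  unfold pvUnseen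
  exact pvFilterAddLen v x hv _ (List.nodup_dedup _) hx

-- ===== PORT A =====
-- The while-loop over the deque: queue of (current pokemon, path so far), shared visited set,
-- accumulator of complete paths.  The `none` branch of the lookup is where Python raises
-- KeyError (excluded by Pre_create_evo_chains); Python has added the name to visited by then.
def stepA (evolutions : List (String × List (String × String))) :
    List (String × String) → PySem.Set String → List String → List String
  | [], _, acc => acc
  | (curr, path) :: rest, visited, acc =>
    if PySem.Set.contains visited curr then
      stepA evolutions rest visited acc
    else
      match hget : PySem.Dict.get? (PySem.Dict.mk evolutions) curr with
      | none => stepA evolutions rest (PySem.Set.add visited curr) acc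
      | some evos =>
        if evos.length = 0 then
          stepA evolutions rest (PySem.Set.add visited curr) (acc ++ [path])
        else
          stepA evolutions
            (evos.reverse.foldl
              (fun q p => (p.1, path ++ "->" ++ p.2 ++ "->" ++ p.1) :: q) rest)
            (PySem.Set.add visited curr) acc
termination_by queue visited _ =>
  pvUnseen evolutions visited * (pvT evolutions + 1) + queue.length
decreasing_by
  · simp only [List.length_cons]
    omega
  · have h := pvUnseenAddLe evolutions visited curr
    have := Nat.mul_le_mul_right (pvT evolutions + 1) h
    simp only [List.length_cons]
    omega
  · have h := pvUnseenAddLe evolutions visited curr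
    have := Nat.mul_le_mul_right (pvT evolutions + 1) h
    simp only [List.length_cons]
    omega
  · have hvis : PySem.Set.contains visited curr = false :=
      Bool.eq_false_iff.mpr ‹¬ PySem.Set.contains visited curr = true›
    have hfacts := pvGetSomeFacts evolutions curr evos hget
    have hsucc := pvUnseenAddSucc evolutions visited curr hfacts.1 hvis
    have hlen : (evos.reverse.foldl
        (fun q p => (p.1, path ++ "->" ++ p.2 ++ "->" ++ p.1) :: q) rest).length
        = evos.length + rest.length := by
      rw [pvFoldlConsEq]
      simp
    rw [hlen]
    have hT := hfacts.2
    clear hfacts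
    have hm : pvUnseen evolutions visited * (pvT evolutions + 1)
        = pvUnseen evolutions (PySem.Set.add visited curr) * (pvT evolutions + 1)
          + (pvT evolutions + 1) := by
      rw [← hsucc]; ring
    simp only [List.length_cons]
    omega

def create_evo_chains (evolutions : List (String × List (String × String))) : List String :=
  stepA evolutions
    ((PySem.Dict.keys (PySem.Dict.mk evolutions)).map (fun name => (name, name)))
    PySem.Set.empty []

-- ===== PORT B =====
-- Recursive DFS from Source B.  The Nat argument is pure fuel (a totality guard): the recursion
-- depth is bounded by the number of distinct names, and create_evo_chains_alt supplies
-- (pvAllNames evolutions).length + 1, so the 0 case is never reached on any input.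
-- The `none` branch of the lookup is where Python raises KeyError (excluded by Pre_).
def visitB (evolutions : List (String × List (String × String))) :
    Nat → String → String → PySem.Set String × List String → PySem.Set String × List String
  | 0, _, _, st => st
  | f + 1, name, path, st =>
    if PySem.Set.contains st.1 name then st
    else
      match PySem.Dict.get? (PySem.Dict.mk evolutions) name with
      | none => (PySem.Set.add st.1 name, st.2)
      | some evos =>
        if evos.isEmpty then (PySem.Set.add st.1 name, st.2 ++ [path])
        else
          evos.foldl
            (fun st' q => visitB evolutions f q.1 (path ++ "->" ++ q.2 ++ "->" ++ q.1) st')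
            (PySem.Set.add st.1 name, st.2)

def create_evo_chains_alt (evolutions : List (String × List (String × String))) : List String :=
  ((PySem.Dict.keys (PySem.Dict.mk evolutions)).foldl
      (fun st name => visitB evolutions ((pvAllNames evolutions).length + 1) name name st)
      (PySem.Set.empty, [])).2

-- ===== PRECONDITION & SPEC =====
-- Pre_ excludes exactly the inputs on which Python raises KeyError: some evolution target
-- is not itself a key of the dict.
def Pre_create_evo_chains (evolutions : List (String × List (String × String))) : Prop :=
  ∀ p ∈ evolutions, ∀ q ∈ p.2, q.1 ∈ evolutions.map Prod.fst
instance (evolutions : List (String × List (String × String))) : Decidable (Pre_create_evo_chains evolutions) := by unfold Pre_create_evo_chains; infer_instance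

def pvWitness_create_evo_chains : (List (String × List (String × String))) :=
  [("bulbasaur", [("ivysaur", "level 16")]), ("ivysaur", [])]

def Spec_create_evo_chains (evolutions : List (String × List (String × String))) (out : List String) : Prop := out = create_evo_chains_alt evolutions
instance (evolutions : List (String × List (String × String))) (out : List String) : Decidable (Spec_create_evo_chains evolutions out) := by unfold Spec_create_evo_chains; infer_instance

-- ===== CLAIM (what is proved, stated in full; the proofs are below) =====
def Claim_equal_create_evo_chains : Prop := ∀ (evolutions : List (String × List (String × String))), Dom_create_evo_chains evolutions → Pre_create_evo_chains evolutions → Spec_create_evo_chains evolutions (create_evo_chains evolutions)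

-- ===== LEMMAS AND PROOFS =====

theorem pvUnseenLeLen (evolutions : List (String × List (String × String)))
    (v : PySem.Set String) :
    pvUnseen evolutions v ≤ (pvAllNames evolutions).length :=
  List.length_filter_le _ _

-- Proof-only view of B: run a list of (name, path) tasks through visitB at a fixed fuel.
def runList (evolutions : List (String × List (String × String))) (f : Nat)
    (tasks : List (String × String)) (st : PySem.Set String × List String) :
    PySem.Set String × List String :=
  tasks.foldl (fun st q => visitB evolutions f q.1 q.2 st) st

theorem runList_cons (evolutions : List (String × List (String × String))) (f : Nat)
    (t : String × String) (ts : List (String × String)) (st : PySem.Set String × List String) :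
    runList evolutions f (t :: ts) st
      = runList evolutions f ts (visitB evolutions f t.1 t.2 st) := rfl

theorem visitB_fold_eq (evolutions : List (String × List (String × String))) (f : Nat)
    (path : String) (evos : List (String × String)) (st : PySem.Set String × List String) :
    evos.foldl
        (fun st' q => visitB evolutions f q.1 (path ++ "->" ++ q.2 ++ "->" ++ q.1) st')
        st
      = runList evolutions f
          (evos.map (fun q => (q.1, path ++ "->" ++ q.2 ++ "->" ++ q.1))) st := by
  simp [runList, List.foldl_map]

theorem visitB_mono (evolutions : List (String × List (String × String))) :
    ∀ (f : Nat) (n p : String) (st : PySem.Set String × List String) (x : String),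
      PySem.Set.contains st.1 x = true →
      PySem.Set.contains (visitB evolutions f n p st).1 x = true := by
  intro f
  induction f with
  | zero => intro n p st x hx; simpa [visitB] using hx
  | succ f ih =>
    intro n p st x hx
    have hadd : PySem.Set.contains (PySem.Set.add st.1 n) x = true := by
      rw [pvContainsAdd, hx, Bool.true_or]
    simp only [visitB]
    cases hc : PySem.Set.contains st.1 n with
    | true => simpa [hc] using hx
    | false =>
      simp only [hc, Bool.false_eq_true, if_false]
      cases hq : PySem.Dict.get? (PySem.Dict.mk evolutions) n with
      | none => simpa using hadd
      | some evos =>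
        cases he : evos.isEmpty with
        | true => simpa [he] using hadd
        | false =>
          simp only [he, Bool.false_eq_true, if_false]
          have hfold : ∀ (l : List (String × String)) (st0 : PySem.Set String × List String),
              PySem.Set.contains st0.1 x = true →
              PySem.Set.contains
                ((l.foldl (fun st' q =>
                    visitB evolutions f q.1 (p ++ "->" ++ q.2 ++ "->" ++ q.1) st') st0).1)
                x = true := by
            intro l
            induction l with
            | nil => intro st0 h0; exact h0
            | cons a l ihl =>
              intro st0 h0
              exact ihl _ (ih _ _ _ _ h0)
          exact hfold evos _ hadd

-- Fuel irrelevance: once the fuel exceeds the number of still-unseen names, visitB (and hence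
-- runList) does not depend on it.
theorem fuel_congr (evolutions : List (String × List (String × String))) :
    ∀ (f : Nat),
      (∀ (g : Nat) (n p : String) (st : PySem.Set String × List String),
        pvUnseen evolutions st.1 < f → pvUnseen evolutions st.1 < g →
        visitB evolutions f n p st = visitB evolutions g n p st) ∧
      (∀ (g : Nat) (tasks : List (String × String)) (st : PySem.Set String × List String),
        pvUnseen evolutions st.1 < f → pvUnseen evolutions st.1 < g →
        runList evolutions f tasks st = runList evolutions g tasks st) := by
  intro f
  induction f using Nat.strong_induction_on with
  | _ f ih =>
    have hv : ∀ (g : Nat) (n p : String) (st : PySem.Set String × List String),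
        pvUnseen evolutions st.1 < f → pvUnseen evolutions st.1 < g →
        visitB evolutions f n p st = visitB evolutions g n p st := by
      intro g n p st hf hg
      match f, g with
      | 0, _ => omega
      | _, 0 => omega
      | f' + 1, g' + 1 =>
        simp only [visitB]
        cases hc : PySem.Set.contains st.1 n with
        | true => simp [hc]
        | false =>
          simp only [hc, Bool.false_eq_true, if_false]
          cases hq : PySem.Dict.get? (PySem.Dict.mk evolutions) n with
          | none => rfl
          | some evos =>
            cases he : evos.isEmpty with
            | true => simp [he]
            | false =>
              simp only [he, Bool.false_eq_true, if_false]
              rw [visitB_fold_eq, visitB_fold_eq]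
              have hmem := (pvGetSomeFacts evolutions n evos hq).1
              have hsucc := pvUnseenAddSucc evolutions st.1 n hmem hc
              have hU : pvUnseen evolutions (PySem.Set.add st.1 n) < f' := by omega
              have hU' : pvUnseen evolutions (PySem.Set.add st.1 n) < g' := by omega
              exact (ih f' (by omega)).2 g' _ _ hU hU'
    refine ⟨hv, ?_⟩
    intro g tasks
    induction tasks with
    | nil => intro st hf hg; rfl
    | cons t ts iht =>
      intro st hf hg
      rw [runList_cons, runList_cons, hv g t.1 t.2 st hf hg]
      have hmono : pvUnseen evolutions (visitB evolutions g t.1 t.2 st).1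
          ≤ pvUnseen evolutions st.1 :=
        pvUnseenMono evolutions _ _ (visitB_mono evolutions g t.1 t.2 st)
      exact iht _ (by omega) (by omega)

-- Simulation: A's explicit queue loop computes exactly B's recursive traversal of the
-- same task list, at B's fixed fuel.
theorem runList_append (evolutions : List (String × List (String × String))) (f : Nat)
    (xs ys : List (String × String)) (st : PySem.Set String × List String) :
    runList evolutions f (xs ++ ys) st = runList evolutions f ys (runList evolutions f xs st) := by
  simp [runList, List.foldl_append]

theorem stepA_eq_runList (evolutions : List (String × List (String × String))) :
    ∀ (queue : List (String × String)) (visited : PySem.Set String) (acc : List String),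
      stepA evolutions queue visited acc
        = (runList evolutions ((pvAllNames evolutions).length + 1) queue (visited, acc)).2 := by
  intro queue visited acc
  induction queue, visited, acc using stepA.induct evolutions with
  | case1 visited acc => simp [stepA, runList]
  | case2 curr path rest visited acc hc ih =>
    have hm : curr ∈ visited := by simpa using hc
    rw [stepA, if_pos hc, ih, runList_cons]
    have hvv : visitB evolutions ((pvAllNames evolutions).length + 1) curr path (visited, acc)
        = (visited, acc) := by
      simp [visitB, hm]
    rw [hvv]
  | case3 curr path rest visited acc hc hget ih =>
    have hm : curr ∉ visited := by simpa using hc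
    have hvv : visitB evolutions ((pvAllNames evolutions).length + 1) curr path (visited, acc)
        = (PySem.Set.add visited curr, acc) := by
      simp [visitB, hm, hget]
    rw [stepA, if_neg hc]
    split
    next h => rw [ih, runList_cons, hvv]
    next evos' h => rw [hget] at h; cases h
  | case4 curr path rest visited acc hc evos hget hlen ih =>
    have hm : curr ∉ visited := by simpa using hc
    have hnil : evos = [] := by cases evos <;> simp_all
    have hvv : visitB evolutions ((pvAllNames evolutions).length + 1) curr path (visited, acc)
        = (PySem.Set.add visited curr, acc ++ [path]) := by
      simp [visitB, hm, hget, hnil]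
    rw [stepA, if_neg hc]
    split
    next h => rw [hget] at h; cases h
    next evos' h =>
      rw [hget] at h
      injection h with h
      subst h
      rw [if_pos hlen, ih, runList_cons, hvv]
  | case5 curr path rest visited acc hc evos hget hlen ih =>
    have hm : curr ∉ visited := by simpa using hc
    have hvis : PySem.Set.contains visited curr = false := Bool.eq_false_iff.mpr hc
    have hne : evos ≠ [] := by cases evos <;> simp_all
    have hmem := (pvGetSomeFacts evolutions curr evos hget).1
    have hsucc := pvUnseenAddSucc evolutions visited curr hmem hvis
    have hle := pvUnseenLeLen evolutions visited
    have hU : pvUnseen evolutions (PySem.Set.add visited curr)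
        < (pvAllNames evolutions).length := by
      omega
    have hv : visitB evolutions ((pvAllNames evolutions).length + 1) curr path (visited, acc)
        = runList evolutions ((pvAllNames evolutions).length)
            (evos.map (fun q => (q.1, path ++ "->" ++ q.2 ++ "->" ++ q.1)))
            (PySem.Set.add visited curr, acc) := by
      simp only [visitB]
      rw [if_neg hc]
      simp only [hget]
      rw [if_neg (by simp [hne] : ¬ evos.isEmpty = true)]
      rw [visitB_fold_eq]
    rw [stepA, if_neg hc]
    split
    next h => rw [hget] at h; cases h
    next evos' h =>
      rw [hget] at h
      injection h with h
      subst h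
      have hinner : runList evolutions ((pvAllNames evolutions).length + 1)
            (evos.map (fun q => (q.1, path ++ "->" ++ q.2 ++ "->" ++ q.1)))
            (PySem.Set.add visited curr, acc)
          = runList evolutions ((pvAllNames evolutions).length)
            (evos.map (fun q => (q.1, path ++ "->" ++ q.2 ++ "->" ++ q.1)))
            (PySem.Set.add visited curr, acc) :=
        (fuel_congr evolutions ((pvAllNames evolutions).length + 1)).2
          ((pvAllNames evolutions).length) _ _ (Nat.lt_succ_of_lt hU) hU
      rw [if_neg hlen, ih, pvFoldlConsEq, List.reverse_reverse, runList_append,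
        runList_cons, hv, hinner]

-- ===== VERDICT (by name: the statement is the Claim_ definition above) =====
theorem create_evo_chains_spec : Claim_equal_create_evo_chains := by
  intro evolutions _ _
  unfold Spec_create_evo_chains create_evo_chains create_evo_chains_alt
  rw [stepA_eq_runList]
  simp [runList, List.foldl_map]
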